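-- pv_equiv track=rewrite | github.com/maxi134/mws.demo | parser/cmds/cmd.py | find_parent
-- ===== SOURCE A (Python) =====
-- def find_parent(spans):
--     dic = dict()
--     for span in spans:
--         candidates = [item for item in spans if
--                       (item[0] == span[0] and item[1] > span[1]) or (item[1] == span[1] and item[0] < span[0])]
--         if candidates:
--             parent = min(candidates, key=lambda n: n[1] - n[0])
--         else:
--             parent = None
--
--         dic[f"{span}"] = parent
--     return dic
-- ===== SOURCE B (Python) =====
-- def find_parent(spans):
--     # Overwrite pass: walk candidates from widest to narrowest and stamp each
--     # matching span's parent slot; the last (narrowest) write wins.  Reversing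
--     # the stable ascending sort makes ties resolve to the first occurrence,
--     # exactly min()'s tie-break.  The dict is assembled in one final pass.
--     parent = [None] * len(spans)
--     for item in reversed(sorted(spans, key=lambda s: s[1] - s[0])):
--         parent = [item if (item[0] == span[0] and item[1] > span[1])
--                   or (item[1] == span[1] and item[0] < span[0]) else p
--                   for span, p in zip(spans, parent)]
--     dic = {}
--     for span, p in zip(spans, parent):
--         dic[f"{span}"] = p
--     return dic
-- ===== Notes on version B (the rewrite author's own statement) =====
-- stated objective: alternative
-- what changed: Replaces A's per-span candidate-filter plus min() scan with an overwrite pass: candidates are walked once from widest to narrowest (reversed stable sort) stamping each matching span's parent slot so the last, narrowest write wins, and the dict is assembled in a single final pass.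
import Mathlib
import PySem

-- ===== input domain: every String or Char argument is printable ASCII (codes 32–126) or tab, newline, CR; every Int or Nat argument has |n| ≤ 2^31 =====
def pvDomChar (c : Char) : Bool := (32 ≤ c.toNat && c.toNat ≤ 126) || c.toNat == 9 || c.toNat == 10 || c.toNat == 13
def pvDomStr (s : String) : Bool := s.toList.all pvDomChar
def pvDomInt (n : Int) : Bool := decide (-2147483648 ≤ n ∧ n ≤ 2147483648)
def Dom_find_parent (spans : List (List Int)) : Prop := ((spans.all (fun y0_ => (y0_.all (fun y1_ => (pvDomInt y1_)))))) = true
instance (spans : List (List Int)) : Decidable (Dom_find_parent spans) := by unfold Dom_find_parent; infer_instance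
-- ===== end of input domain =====

-- B replaces A's per-span filter+min with an overwrite pass: candidates are walked
-- from widest to narrowest stamping each matching span's parent slot (last write
-- wins), and the dict is assembled in one final pass (alternative decomposition).
-- Shared helpers (both Pythons use the same subscripting, f"{span}" key and
-- candidate condition textually):

-- item[i] for i = 0, 1; exact under Pre_ (every span has length ≥ 2)
def pvGet (s : List Int) (i : Int) : Int := PySem.List.pyGetD s i 0

-- f"{span}" for a Python tuple of ints: "(1, 2)" (trailing comma for a 1-tuple)
def pvRepr (s : List Int) : String :=
  match s with
  | [x] => "(" ++ PySem.Int.toStr x ++ ",)"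
  | _ => "(" ++ PySem.Str.join ", " (s.map PySem.Int.toStr) ++ ")"

-- (item[0] == span[0] and item[1] > span[1]) or (item[1] == span[1] and item[0] < span[0])
def pvCand (span item : List Int) : Bool :=
  (pvGet item 0 == pvGet span 0 && pvGet span 1 < pvGet item 1) ||
  (pvGet item 1 == pvGet span 1 && pvGet item 0 < pvGet span 0)

-- lambda n: n[1] - n[0]
def pvWidth (n : List Int) : Int := pvGet n 1 - pvGet n 0

-- ===== PORT A =====
def find_parent (spans : List (List Int)) : List (String × Option (List Int)) :=
  (spans.foldl (fun dic span =>
      let candidates := spans.filter (fun item => pvCand span item)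
      let parent : Option (List Int) :=
        if !candidates.isEmpty then PySem.List.min? candidates pvWidth else none
      dic.insert (pvRepr span) parent)
    (PySem.Dict.empty : PySem.Dict String (Option (List Int)))).items

-- ===== PORT B =====
def find_parent_alt (spans : List (List Int)) : List (String × Option (List Int)) :=
  let parent0 : List (Option (List Int)) := List.replicate spans.length none
  let parent := ((PySem.List.sorted spans pvWidth false).reverse).foldl
      (fun par item =>
        (spans.zip par).map (fun sp => if pvCand sp.1 item then some item else sp.2))
      parent0
  ((spans.zip parent).foldl (fun dic sp => dic.insert (pvRepr sp.1) sp.2)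
    (PySem.Dict.empty : PySem.Dict String (Option (List Int)))).items

-- ===== PRECONDITION & SPEC =====
-- Pre_ excludes exactly the inputs on which Python A raises IndexError: a span of
-- length < 2 while spans is nonempty would be subscripted at [0]/[1].
def Pre_find_parent (spans : List (List Int)) : Prop := ∀ s ∈ spans, 2 ≤ s.length
instance (spans : List (List Int)) : Decidable (Pre_find_parent spans) := by unfold Pre_find_parent; infer_instance

def pvWitness_find_parent : List (List Int) := [[0, 3], [0, 1], [1, 3]]

def Spec_find_parent (spans : List (List Int)) (out : List (String × Option (List Int))) : Prop := out = find_parent_alt spans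
instance (spans : List (List Int)) (out : List (String × Option (List Int))) : Decidable (Spec_find_parent spans out) := by unfold Spec_find_parent; infer_instance

-- ===== CLAIM (what is proved, stated in full; the proofs are below) =====
def Claim_equal_find_parent : Prop := ∀ (spans : List (List Int)), Dom_find_parent spans → Pre_find_parent spans → Spec_find_parent spans (find_parent spans)

-- ===== LEMMAS AND PROOFS =====

-- first match in an insertion step of the stable sort, on an already key-sorted list
theorem find?_insertBy {α : Type} (key : α → Int) (p : α → Bool) (x : α) (l : List α)
    (hs : l.Pairwise (fun a b => key a ≤ key b)) :
    List.find? p (PySem.List.insertBy (fun a b => decide (key a < key b)) x l) =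
      if p x then
        (match List.find? p l with
         | none => some x
         | some m => if key x < key m then some x else some m)
      else List.find? p l := by
  induction l with
  | nil => cases hp : p x <;> simp [PySem.List.insertBy, List.find?, hp]
  | cons y ys ih =>
      have hs' := (List.pairwise_cons.mp hs).2
      have hy : ∀ z ∈ ys, key y ≤ key z := (List.pairwise_cons.mp hs).1
      rw [PySem.List.insertBy]
      by_cases hlt : key x < key y
      · -- x is inserted in front of y
        simp only [hlt, decide_true, if_true]
        cases hp : p x with
        | true =>
            simp only [List.find?_cons, hp]
            cases hpy : p y with
            | true => simp [hlt]
            | false =>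
                cases hf : List.find? p ys with
                | none => simp
                | some m =>
                    have hm : m ∈ ys := List.mem_of_find?_eq_some hf
                    have : key x < key m := lt_of_lt_of_le hlt (hy m hm)
                    simp [this]
        | false => simp [List.find?_cons, hp]
      · -- x is inserted somewhere in ys
        simp only [hlt, decide_false, Bool.false_eq_true, if_false]
        cases hpy : p y with
        | true =>
            have hxy : key y ≤ key x := le_of_not_gt hlt
            cases hp : p x with
            | true => simp [hpy, not_lt.mpr hxy]
            | false => simp [hpy]
        | false => simp [hpy, ih hs']

theorem sorted_append_singleton {α : Type} (key : α → Int) (xs : List α) (x : α) :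
    PySem.List.sorted (xs ++ [x]) key false =
      PySem.List.insertBy (fun a b => decide (key a < key b)) x (PySem.List.sorted xs key false) := by
  simp [PySem.List.sorted, List.foldl_append]

theorem min?_append_singleton {α : Type} (key : α → Int) (l : List α) (x : α) :
    PySem.List.min? (l ++ [x]) key =
      (match PySem.List.min? l key with
       | none => some x
       | some m => if key x < key m then some x else some m) := by
  simp only [PySem.List.min?, List.foldl_append, List.foldl_cons, List.foldl_nil]
  rfl

-- first match in width order = Python min (first extremal) of the filtered list
theorem find?_sorted_eq_min?_filter {α : Type} (key : α → Int) (p : α → Bool) (xs : List α) :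
    List.find? p (PySem.List.sorted xs key false) = PySem.List.min? (xs.filter p) key := by
  induction xs using List.reverseRecOn with
  | nil => rfl
  | append_singleton xs x ih =>
      rw [sorted_append_singleton, find?_insertBy key p x _ (PySem.List.sorted_pairwise xs key),
        ih, List.filter_append]
      by_cases hp : p x = true
      · simp [hp, min?_append_singleton]
      · simp [hp]

theorem if_isEmpty_min? {α : Type} (key : α → Int) (l : List α) :
    (if !l.isEmpty then PySem.List.min? l key else none) = PySem.List.min? l key := by
  cases l <;> simp [PySem.List.min?]

-- zip a list with a map over its own zip
theorem zip_map_zip_right {α β γ : Type} (f : α × β → γ) :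
    ∀ (l1 : List α) (l2 : List β),
      l1.zip ((l1.zip l2).map f) = (l1.zip l2).map (fun p => (p.1, f p)) := by
  intro l1
  induction l1 with
  | nil => intro l2; simp
  | cons a t ih => intro l2; cases l2 <;> simp [ih]

-- "last write wins": the slot-wise value of the overwrite fold
def pvLast (rev : List (List Int)) (s : List Int) (p : Option (List Int)) : Option (List Int) :=
  match rev.reverse.find? (fun it => pvCand s it) with
  | some it => some it
  | none => p

theorem pvLast_cons (x : List Int) (rest : List (List Int)) (s : List Int) (p : Option (List Int)) :
    pvLast (x :: rest) s p = pvLast rest s (if pvCand s x then some x else p) := by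
  unfold pvLast
  rw [List.reverse_cons, List.find?_append]
  cases rest.reverse.find? (fun it => pvCand s it) <;>
    cases hc : pvCand s x <;> simp [hc, List.find?]

theorem map_snd_zip_eq {α β : Type} :
    ∀ (l1 : List α) (l2 : List β), l2.length = l1.length →
      (l1.zip l2).map (fun p => p.2) = l2 := by
  intro l1
  induction l1 with
  | nil => intro l2 h; cases l2 <;> simp_all
  | cons a t ih => intro l2 h; cases l2 <;> simp_all

theorem overwrite_fold_eq (spans : List (List Int)) :
    ∀ (rev : List (List Int)) (par : List (Option (List Int))),
      par.length = spans.length →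
      rev.foldl (fun par item =>
          (spans.zip par).map (fun sp => if pvCand sp.1 item then some item else sp.2)) par =
        (spans.zip par).map (fun sp => pvLast rev sp.1 sp.2) := by
  intro rev
  induction rev with
  | nil =>
      intro par hlen
      simp only [List.foldl_nil, pvLast, List.reverse_nil, List.find?_nil]
      exact (map_snd_zip_eq spans par hlen).symm
  | cons x rest ih =>
      intro par hlen
      rw [List.foldl_cons, ih _ (by rw [List.length_map, List.length_zip]; omega),
        zip_map_zip_right, List.map_map]
      apply List.map_congr_left
      intro p _
      simp only [Function.comp_apply, pvLast_cons]

-- zipping with a constant / with a map of the same list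
theorem zip_replicate_none (spans : List (List Int)) :
    spans.zip (List.replicate spans.length (none : Option (List Int))) =
      spans.map (fun s => (s, (none : Option (List Int)))) := by
  induction spans with
  | nil => rfl
  | cons a t ih => simp [List.replicate_succ, ih]

theorem zip_map_self {α β : Type} (f : α → β) (l : List α) :
    l.zip (l.map f) = l.map (fun x => (x, f x)) := by
  induction l with
  | nil => rfl
  | cons a t ih => simp [ih]

-- ===== VERDICT (by name: the statement is the Claim_ definition above) =====
theorem find_parent_spec : Claim_equal_find_parent := by
  intro spans _ _
  unfold Spec_find_parent
  show find_parent spans = find_parent_alt spans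
  simp only [find_parent, find_parent_alt]
  rw [overwrite_fold_eq spans _ _ (List.length_replicate), zip_replicate_none, List.map_map,
    zip_map_self, List.foldl_map]
  have hval : ∀ s : List Int,
      (if !(spans.filter (fun item => pvCand s item)).isEmpty then
          PySem.List.min? (spans.filter (fun item => pvCand s item)) pvWidth
        else none) =
      ((fun sp : List Int × Option (List Int) => pvLast (PySem.List.sorted spans pvWidth false).reverse sp.1 sp.2) ∘
        fun s => (s, (none : Option (List Int)))) s := by
    intro s
    simp only [Function.comp_apply, pvLast, List.reverse_reverse,
      find?_sorted_eq_min?_filter, if_isEmpty_min?]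
    cases PySem.List.min? (spans.filter (fun item => pvCand s item)) pvWidth <;> rfl
  apply congrArg
  apply congrArg (fun f => List.foldl f _ spans)
  funext dic s
  rw [hval s]
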